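-- pv_equiv track=rewrite | github.com/pypi-data/pypi-mirror-385 | packages/healthyselfjournal/healthyselfjournal-0.2.9.tar.gz/healthyselfjournal-0.2.9/gjdutils/src/gjdutils/html.py | adjust_indentation
-- ===== SOURCE A (Python) =====
-- def adjust_indentation(pretty_html, indent: int):
--     # from https://www.perplexity.ai/search/can-you-customise-the-beautifu-225tf.pISaiggsL5tNL.gA
--     lines = pretty_html.split("\n")
--     adjusted_lines = []
--     for line in lines:
--         line_lstrip = line.lstrip(" ")
--         leading_spaces = len(line) - len(line_lstrip)
--         indent_level = leading_spaces // 1  # default indent is 1 space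
--         adjusted_lines.append(" " * (indent_level * indent) + line_lstrip)
--     return "\n".join(adjusted_lines)
-- ===== SOURCE B (Python) =====
-- def adjust_indentation(pretty_html, indent: int):
--     # single left-to-right scan: no line list, no join of split pieces
--     out = []
--     i = 0
--     n = len(pretty_html)
--     while i < n:
--         j = i
--         while j < n and pretty_html[j] == ' ':
--             j += 1
--         out.append(' ' * ((j - i) * indent))
--         k = pretty_html.find('\n', j)
--         if k == -1:
--             out.append(pretty_html[j:])
--             i = n
--         else:
--             out.append(pretty_html[j:k + 1])
--             i = k + 1
--     return ''.join(out)
-- ===== Notes on version B (the rewrite author's own statement) =====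
-- stated objective: alternative
-- what changed: A splits into a line list, reindents each line with lstrip/length arithmetic and joins; B makes one left-to-right scan over the string, measuring each leading-space run in place and copying the rest of each line via find('\n'), with no line list and no split/join.
import Mathlib
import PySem

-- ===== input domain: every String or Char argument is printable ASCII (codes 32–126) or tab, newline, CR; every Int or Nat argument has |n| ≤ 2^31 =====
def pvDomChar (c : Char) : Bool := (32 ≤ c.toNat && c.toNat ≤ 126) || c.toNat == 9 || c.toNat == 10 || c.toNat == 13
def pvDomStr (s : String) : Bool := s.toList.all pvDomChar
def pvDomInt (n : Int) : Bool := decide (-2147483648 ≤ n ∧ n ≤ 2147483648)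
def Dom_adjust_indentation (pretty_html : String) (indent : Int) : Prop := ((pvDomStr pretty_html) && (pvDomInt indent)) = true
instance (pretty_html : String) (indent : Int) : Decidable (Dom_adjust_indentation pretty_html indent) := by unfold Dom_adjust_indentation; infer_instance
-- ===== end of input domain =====

-- B replaces A's split-into-lines / per-line rebuild / join by a single left-to-right scan of
-- the character sequence; same O(n) cost, no speed claim.

-- ===== PORT A =====
-- line.lstrip(" ") drops exactly the leading ' ' characters: List.dropWhile (· == ' ') is exact.
-- " " * k is "" for k ≤ 0: Int.toNat clamps negatives to 0, which is exact.
def adjust_indentation (pretty_html : String) (indent : Int) : String :=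
  let lines := PySem.Chars.splitOn pretty_html.toList ['\n']
  let adjusted_lines := lines.foldl (fun acc line =>
    let line_lstrip := line.dropWhile (fun c => c == ' ')
    let leading_spaces : Int := (line.length : Int) - (line_lstrip.length : Int)
    let indent_level := PySem.Int.floordiv leading_spaces 1
    acc ++ [List.replicate (indent_level * indent).toNat ' ' ++ line_lstrip]) []
  String.mk (PySem.Chars.join ['\n'] adjusted_lines)

-- ===== PORT B =====
-- Source B's scanner: the inner `while … == ' '` scan is takeWhile/dropWhile on the current suffix,
-- `k = find('\n', j)` splits the line body off as takeWhile/dropWhile on (· == '\n')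
-- (`k == -1` is `rest2 = []`); each outer-loop iteration is one recursive call on the suffix
-- after the consumed '\n'.
def adjustAltGo (indent : Int) (cs : List Char) : List Char :=
  if cs.isEmpty then [] else
    let sp := cs.takeWhile (fun c => c == ' ')
    let rest := cs.dropWhile (fun c => c == ' ')
    let body := rest.takeWhile (fun c => !(c == '\n'))
    let rest2 := rest.dropWhile (fun c => !(c == '\n'))
    List.replicate ((sp.length : Int) * indent).toNat ' ' ++ body ++
      (if h : rest2 = [] then ([] : List Char) else '\n' :: adjustAltGo indent rest2.tail)
termination_by cs.length
decreasing_by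
  have h1 : (cs.dropWhile (fun c => c == ' ')).length ≤ cs.length :=
    List.length_dropWhile_le _ _
  have h2 : ((cs.dropWhile (fun c => c == ' ')).dropWhile (fun c => !(c == '\n'))).length ≤
      (cs.dropWhile (fun c => c == ' ')).length := List.length_dropWhile_le _ _
  have h3 : 0 < ((cs.dropWhile (fun c => c == ' ')).dropWhile (fun c => !(c == '\n'))).length :=
    List.length_pos_of_ne_nil h
  rw [List.length_tail]
  omega

def adjust_indentation_alt (pretty_html : String) (indent : Int) : String :=
  String.mk (adjustAltGo indent pretty_html.toList)

-- ===== PRECONDITION & SPEC =====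
def Spec_adjust_indentation (pretty_html : String) (indent : Int) (out : String) : Prop := out = adjust_indentation_alt pretty_html indent
instance (pretty_html : String) (indent : Int) (out : String) : Decidable (Spec_adjust_indentation pretty_html indent out) := by unfold Spec_adjust_indentation; infer_instance

-- ===== CLAIM (what is proved, stated in full; the proofs are below) =====
def Claim_equal_adjust_indentation : Prop := ∀ (pretty_html : String) (indent : Int), Dom_adjust_indentation pretty_html indent → Spec_adjust_indentation pretty_html indent (adjust_indentation pretty_html indent)

-- ===== LEMMAS AND PROOFS =====

-- structural version of cs.split("\n")
def pvLines : List Char → List (List Char)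
  | [] => [[]]
  | c :: t =>
    if c = '\n' then [] :: pvLines t
    else
      match pvLines t with
      | x :: xs => (c :: x) :: xs
      | [] => [[c]]

theorem pvLines_ne_nil (cs : List Char) : pvLines cs ≠ [] := by
  cases cs with
  | nil => simp [pvLines]
  | cons c t =>
    simp only [pvLines]
    split <;> [skip; split] <;> simp

theorem splitOn_go_eq (fuel : Nat) (l cur : List Char) (acc : List (List Char))
    (hf : l.length < fuel) :
    PySem.Chars.splitOn.go ['\n'] fuel l cur acc =
      acc.reverse ++ (pvLines l).modifyHead (cur.reverse ++ ·) := by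
  induction fuel generalizing l cur acc with
  | zero => omega
  | succ fuel ih =>
    cases l with
    | nil =>
      rw [PySem.Chars.splitOn.go.eq_def]
      simp [pvLines]
    | cons c rest =>
      rw [PySem.Chars.splitOn.go.eq_def]
      simp only [List.isPrefixOf, Bool.and_true]
      by_cases hc : c = '\n'
      · subst hc
        simp only [beq_self_eq_true, if_pos]
        rw [ih _ _ _ (by simpa using Nat.lt_of_succ_lt_succ (by simpa using hf))]
        simp only [pvLines, List.modifyHead, List.reverse_cons,
          List.append_assoc, List.singleton_append]
        cases hx : pvLines rest <;> simp [hx]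
      · rw [if_neg (by simp [hc, BEq.comm])]
        rw [ih _ _ _ (by simpa using Nat.lt_of_succ_lt_succ (by simpa using hf))]
        simp only [pvLines, if_neg hc]
        rcases hx : pvLines rest with _ | ⟨x, xs⟩
        · exact absurd hx (pvLines_ne_nil rest)
        · simp [List.modifyHead]

theorem splitOn_eq_pvLines (cs : List Char) :
    PySem.Chars.splitOn cs ['\n'] = pvLines cs := by
  unfold PySem.Chars.splitOn
  rw [splitOn_go_eq _ _ _ _ (by omega)]
  rcases hx : pvLines cs with _ | ⟨x, xs⟩
  · exact absurd hx (pvLines_ne_nil cs)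
  · simp [List.modifyHead]

-- pvLines splits off the first line at the first '\n'
theorem pvLines_decomp (cs : List Char) :
    pvLines cs = cs.takeWhile (fun c => !(c == '\n')) ::
      (match cs.dropWhile (fun c => !(c == '\n')) with
       | _ :: t => pvLines t
       | [] => []) := by
  induction cs with
  | nil => simp [pvLines]
  | cons c t ih =>
    by_cases hc : c = '\n'
    · subst hc; simp [pvLines, List.takeWhile, List.dropWhile]
    · simp only [pvLines, if_neg hc, List.takeWhile, List.dropWhile,
        show (!(c == '\n')) = true by simp [hc]]
      rw [ih]

-- the per-line transformation of A, after the foldl is turned into a map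
def pvF (indent : Int) (line : List Char) : List Char :=
  List.replicate
    ((PySem.Int.floordiv ((line.length : Int) - ((line.dropWhile (fun c => c == ' ')).length : Int)) 1) * indent).toNat ' '
    ++ line.dropWhile (fun c => c == ' ')

theorem floordiv_one (a : Int) : PySem.Int.floordiv a 1 = a := by
  rw [PySem.Int.floordiv_eq_ediv_of_pos (by omega : (0:Int) < 1)]; omega

-- on a first line of the form (spaces ++ body) with body starting non-space, pvF rebuilds it
theorem pvF_line (indent : Int) (cs : List Char) :
    pvF indent ((cs.takeWhile (fun c => c == ' ')) ++
        ((cs.dropWhile (fun c => c == ' ')).takeWhile (fun c => !(c == '\n')))) =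
      List.replicate (((cs.takeWhile (fun c => c == ' ')).length : Int) * indent).toNat ' ' ++
        ((cs.dropWhile (fun c => c == ' ')).takeWhile (fun c => !(c == '\n'))) := by
  have hsp : ∀ x ∈ cs.takeWhile (fun c => c == ' '), (fun c => c == ' ') x = true :=
    fun x hx => List.mem_takeWhile_imp (p := fun c => c == ' ') hx
  have hbody : ((cs.dropWhile (fun c => c == ' ')).takeWhile (fun c => !(c == '\n'))).dropWhile
      (fun c => c == ' ') = (cs.dropWhile (fun c => c == ' ')).takeWhile (fun c => !(c == '\n')) := by
    rcases hd : cs.dropWhile (fun c => c == ' ') with _ | ⟨d, ds⟩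
    · simp
    · have hw : cs.dropWhile (fun c => c == ' ') ≠ [] := by simp [hd]
      have hpd := List.head_dropWhile_not (fun c => c == ' ') hw
      simp only [hd, List.head_cons] at hpd
      by_cases hq : (!(d == '\n')) = true
      · simp [hq, List.dropWhile_cons, hpd]
      · simp [hq]
  unfold pvF
  rw [List.dropWhile_append_of_pos hsp, hbody, floordiv_one]
  have hlen : (((cs.takeWhile (fun c => c == ' ')) ++
        ((cs.dropWhile (fun c => c == ' ')).takeWhile (fun c => !(c == '\n')))).length : Int) -
      (((cs.dropWhile (fun c => c == ' ')).takeWhile (fun c => !(c == '\n'))).length : Int) =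
      ((cs.takeWhile (fun c => c == ' ')).length : Int) := by
    rw [List.length_append]; push_cast; ring
  rw [hlen]

theorem main_lemma (indent : Int) (cs : List Char) :
    PySem.Chars.join ['\n'] ((pvLines cs).map (pvF indent)) = adjustAltGo indent cs := by
  have H : ∀ n (cs : List Char), cs.length ≤ n →
      PySem.Chars.join ['\n'] ((pvLines cs).map (pvF indent)) = adjustAltGo indent cs := by
    intro n
    induction n with
    | zero =>
      intro cs hlen
      have : cs = [] := by
        cases cs with
        | nil => rfl
        | cons c t => simp at hlen
      subst this
      rw [adjustAltGo.eq_def]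
      simp [pvLines, PySem.Chars.join_singleton, pvF]
    | succ n ih =>
      intro cs hlen
      have hsp : ∀ x ∈ cs.takeWhile (fun c => c == ' '), (fun c => !(c == '\n')) x = true := by
        intro x hx
        have := List.mem_takeWhile_imp (p := fun c => c == ' ') hx
        simp only [beq_iff_eq] at this
        simp [this]
      have hdw : cs.dropWhile (fun c => !(c == '\n')) =
          (cs.dropWhile (fun c => c == ' ')).dropWhile (fun c => !(c == '\n')) := by
        conv_lhs => rw [← List.takeWhile_append_dropWhile (p := fun c => c == ' ') (l := cs)]
        rw [List.dropWhile_append_of_pos hsp]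
      have htw : cs.takeWhile (fun c => !(c == '\n')) =
          cs.takeWhile (fun c => c == ' ') ++
            (cs.dropWhile (fun c => c == ' ')).takeWhile (fun c => !(c == '\n')) := by
        conv_lhs => rw [← List.takeWhile_append_dropWhile (p := fun c => c == ' ') (l := cs)]
        rw [List.takeWhile_append_of_pos hsp]
      rw [pvLines_decomp, hdw]
      cases cs with
      | nil =>
        rw [adjustAltGo.eq_def]
        simp [PySem.Chars.join_singleton, pvF]
      | cons c0 t0 =>
        rw [show adjustAltGo indent (c0 :: t0) =
            List.replicate ((((c0 :: t0).takeWhile (fun c => c == ' ')).length : Int) * indent).toNat ' ' ++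
              ((c0 :: t0).dropWhile (fun c => c == ' ')).takeWhile (fun c => !(c == '\n')) ++
              (if _h : ((c0 :: t0).dropWhile (fun c => c == ' ')).dropWhile (fun c => !(c == '\n')) = []
               then []
               else '\n' :: adjustAltGo indent
                 (((c0 :: t0).dropWhile (fun c => c == ' ')).dropWhile (fun c => !(c == '\n'))).tail)
            from by rw [adjustAltGo.eq_def]; rfl]
        rcases hr : ((c0 :: t0).dropWhile (fun c => c == ' ')).dropWhile (fun c => !(c == '\n')) with _ | ⟨d, t⟩
        · rw [show (match ([] : List Char) with
              | _ :: t => pvLines t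
              | [] => ([] : List (List Char))) = [] from rfl]
          rw [List.map_cons, List.map_nil, PySem.Chars.join_singleton, htw, pvF_line]
          simp
        · have hd : d = '\n' := by
            have := List.head_dropWhile_not (fun c => !(c == '\n'))
              (l := (c0 :: t0).dropWhile (fun c => c == ' ')) (by simp [hr])
            simp only [hr] at this
            simpa using this
          subst hd
          rw [show (match ('\n' :: t : List Char) with
              | _ :: t => pvLines t
              | [] => ([] : List (List Char))) = pvLines t from rfl]
          have hlt : t.length ≤ n := by
            have h1 : ((c0 :: t0).dropWhile (fun c => c == ' ')).length ≤ (c0 :: t0).length :=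
              List.length_dropWhile_le _ _
            have h2 := List.length_dropWhile_le (fun c => !(c == '\n'))
              ((c0 :: t0).dropWhile (fun c => c == ' '))
            rw [hr] at h2
            simp only [List.length_cons] at h1 h2 hlen ⊢
            omega
          rcases hy : pvLines t with _ | ⟨y, ys⟩
          · exact absurd hy (pvLines_ne_nil t)
          · simp only [List.map_cons]
            rw [PySem.Chars.join_cons_cons, htw, pvF_line]
            rw [← List.map_cons, ← hy, ih t hlt]
            rw [dif_neg (by simp)]
            simp
  exact H cs.length cs le_rfl

-- ===== VERDICT (by name: the statement is the Claim_ definition above) =====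
theorem adjust_indentation_spec : Claim_equal_adjust_indentation := by
  intro pretty_html indent _
  unfold Spec_adjust_indentation adjust_indentation adjust_indentation_alt
  simp only [splitOn_eq_pvLines]
  rw [show List.foldl (fun acc line =>
      let line_lstrip := line.dropWhile (fun c => c == ' ')
      let leading_spaces : Int := (line.length : Int) - (line_lstrip.length : Int)
      let indent_level := PySem.Int.floordiv leading_spaces 1
      acc ++ [List.replicate (indent_level * indent).toNat ' ' ++ line_lstrip]) []
      (pvLines pretty_html.toList) = (pvLines pretty_html.toList).map (pvF indent)
    from PySem.List.foldl_append_singleton_eq_map (pvF indent) (pvLines pretty_html.toList) []]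
  rw [main_lemma]
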